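-- pv_equiv track=rewrite | github.com/tdcasual/teacherAgent | scripts/build_analysis_release_readiness_report.py | _build_runtime_snapshot_from_records
-- ===== SOURCE A (Python) =====
-- from collections import defaultdict
-- from typing import Any, Dict, List
--
-- _RUNTIME_REASON_COUNTERS = {
--     'timeout': 'timeout_count',
--     'invalid_output': 'invalid_output_count',
--     'budget_exceeded': 'budget_rejection_count',
--     'specialist_execution_failed': 'fallback_count',
-- }
--
-- def _build_runtime_snapshot_from_records(records: List[Dict[str, Any]]) -> Dict[str, Any]:
--     counters = {
--         'run_count': 0,
--         'fail_count': 0,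
--         'timeout_count': 0,
--         'invalid_output_count': 0,
--         'budget_rejection_count': 0,
--         'fallback_count': 0,
--         'review_downgrade_count': 0,
--         'reviewer_reject_count': 0,
--         'rerun_count': 0,
--     }
--     by_phase: Dict[str, int] = defaultdict(int)
--     for item in records:
--         phase = str(item.get('phase') or '').strip() or 'unknown'
--         reason_code = str(item.get('reason_code') or '').strip() or None
--         by_phase[phase] += 1
--         if phase == 'started':
--             counters['run_count'] += 1
--         if phase == 'failed':
--             counters['fail_count'] += 1
--         if phase == 'review_downgraded':
--             counters['review_downgrade_count'] += 1
--         if phase == 'reviewer_rejected':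
--             counters['reviewer_reject_count'] += 1
--         if phase == 'rerun_requested':
--             counters['rerun_count'] += 1
--         if reason_code:
--             counter_key = _RUNTIME_REASON_COUNTERS.get(reason_code)
--             if counter_key:
--                 counters[counter_key] += 1
--     return {'counters': counters, 'by_phase': dict(by_phase)}
-- ===== SOURCE B (Python) =====
-- _RUNTIME_REASON_COUNTERS = {
--     'timeout': 'timeout_count',
--     'invalid_output': 'invalid_output_count',
--     'budget_exceeded': 'budget_rejection_count',
--     'specialist_execution_failed': 'fallback_count',
-- }
--
-- def _build_runtime_snapshot_from_records(records):
--     phases = [str(r.get('phase') or '').strip() or 'unknown' for r in records]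
--     reasons = [rc for r in records
--                if (rc := str(r.get('reason_code') or '').strip()) in _RUNTIME_REASON_COUNTERS]
--     counters = {
--         'run_count': phases.count('started'),
--         'fail_count': phases.count('failed'),
--         'timeout_count': reasons.count('timeout'),
--         'invalid_output_count': reasons.count('invalid_output'),
--         'budget_rejection_count': reasons.count('budget_exceeded'),
--         'fallback_count': reasons.count('specialist_execution_failed'),
--         'review_downgrade_count': phases.count('review_downgraded'),
--         'reviewer_reject_count': phases.count('reviewer_rejected'),
--         'rerun_count': phases.count('rerun_requested'),
--     }
--     by_phase = {p: phases.count(p) for p in dict.fromkeys(phases)}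
--     return {'counters': counters, 'by_phase': by_phase}
-- ===== Notes on version B (the rewrite author's own statement) =====
-- stated objective: alternative
-- what changed: A threads a mutable nine-key counters dict and a defaultdict through a per-record five-branch if-chain; B has no accumulator at all: it first maps records to a normalized phase list and a filtered reason-code list, then builds each result entry declaratively with list.count, and by_phase as a comprehension over dict.fromkeys(phases).
import Mathlib
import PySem

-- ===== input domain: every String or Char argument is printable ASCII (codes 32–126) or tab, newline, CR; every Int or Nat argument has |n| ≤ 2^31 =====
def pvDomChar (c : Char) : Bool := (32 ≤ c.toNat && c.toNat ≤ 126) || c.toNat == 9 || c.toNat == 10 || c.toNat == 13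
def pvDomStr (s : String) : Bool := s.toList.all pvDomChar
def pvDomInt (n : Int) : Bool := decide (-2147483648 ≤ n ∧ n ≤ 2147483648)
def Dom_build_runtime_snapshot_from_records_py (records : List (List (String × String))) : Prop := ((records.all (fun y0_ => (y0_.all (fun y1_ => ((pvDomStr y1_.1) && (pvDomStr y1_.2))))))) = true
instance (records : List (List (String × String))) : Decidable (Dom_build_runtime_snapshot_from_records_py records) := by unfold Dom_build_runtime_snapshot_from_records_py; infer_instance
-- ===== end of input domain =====

-- B replaces A's accumulator loop by staged declarative passes (normalized lists + list.count
-- projections); same return value, similar cost.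

-- _RUNTIME_REASON_COUNTERS (module constant, used by both sides)
def pvRRC : PySem.Dict String String := PySem.Dict.ofList
  [("timeout", "timeout_count"), ("invalid_output", "invalid_output_count"),
   ("budget_exceeded", "budget_rejection_count"), ("specialist_execution_failed", "fallback_count")]

-- str(item.get('phase') or '').strip() or 'unknown'  (identical expression in both Pythons)
def pvPhase (item : List (String × String)) : String :=
  let p := PySem.Str.strip (((PySem.Dict.mk item).get? "phase").getD "")
  if p == "" then "unknown" else p

-- str(item.get('reason_code') or '').strip()  (identical expression in both Pythons)
def pvReasonStr (item : List (String × String)) : String :=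
  PySem.Str.strip (((PySem.Dict.mk item).get? "reason_code").getD "")

-- ===== PORT A =====
-- the five phase ifs and the reason-counter if of A's loop body, acting on `counters`
-- (counters['k'] += 1 always finds the key present, so it is d.modify k 0 (·+1) value-exactly)
def pvPhaseIfs (counters : PySem.Dict String Int) (phase : String) : PySem.Dict String Int :=
  let counters := if phase == "started" then counters.modify "run_count" 0 (· + 1) else counters
  let counters := if phase == "failed" then counters.modify "fail_count" 0 (· + 1) else counters
  let counters := if phase == "review_downgraded" then counters.modify "review_downgrade_count" 0 (· + 1) else counters
  let counters := if phase == "reviewer_rejected" then counters.modify "reviewer_reject_count" 0 (· + 1) else counters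
  if phase == "rerun_requested" then counters.modify "rerun_count" 0 (· + 1) else counters

def pvReasonIf (counters : PySem.Dict String Int) (reason_code : Option String) : PySem.Dict String Int :=
  match reason_code with
  | some rc =>
    match pvRRC.get? rc with
    | some counter_key => counters.modify counter_key 0 (· + 1)
    | none => counters
  | none => counters

def pvStepA (st : PySem.Dict String Int × PySem.Dict String Int) (item : List (String × String)) :
    PySem.Dict String Int × PySem.Dict String Int :=
  let phase := pvPhase item
  let reason_code : Option String := let s := pvReasonStr item; if s == "" then none else some s
  let by_phase := st.2.modify phase 0 (· + 1)
  (pvReasonIf (pvPhaseIfs st.1 phase) reason_code, by_phase)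

def build_runtime_snapshot_from_records_py (records : List (List (String × String))) : List (String × List (String × Int)) :=
  let init : PySem.Dict String Int := PySem.Dict.ofList
    [("run_count", 0), ("fail_count", 0), ("timeout_count", 0), ("invalid_output_count", 0),
     ("budget_rejection_count", 0), ("fallback_count", 0), ("review_downgrade_count", 0),
     ("reviewer_reject_count", 0), ("rerun_count", 0)]
  let st := records.foldl pvStepA (init, PySem.Dict.empty)
  [("counters", st.1.items), ("by_phase", st.2.items)]

-- ===== PORT B =====
def build_runtime_snapshot_from_records_py_alt (records : List (List (String × String))) : List (String × List (String × Int)) :=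
  let phases := records.map pvPhase
  let reasons := records.filterMap (fun r =>
    let rc := pvReasonStr r
    if pvRRC.contains rc then some rc else none)
  [("counters",
    [("run_count", (phases.count "started" : Int)), ("fail_count", (phases.count "failed" : Int)),
     ("timeout_count", (reasons.count "timeout" : Int)), ("invalid_output_count", (reasons.count "invalid_output" : Int)),
     ("budget_rejection_count", (reasons.count "budget_exceeded" : Int)), ("fallback_count", (reasons.count "specialist_execution_failed" : Int)),
     ("review_downgrade_count", (phases.count "review_downgraded" : Int)), ("reviewer_reject_count", (phases.count "reviewer_rejected" : Int)),
     ("rerun_count", (phases.count "rerun_requested" : Int))]),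
   ("by_phase", (PySem.List.dedup phases).map (fun p => (p, (phases.count p : Int))))]

-- ===== PRECONDITION & SPEC =====
def Spec_build_runtime_snapshot_from_records_py (records : List (List (String × String))) (out : List (String × List (String × Int))) : Prop := out = build_runtime_snapshot_from_records_py_alt records
instance (records : List (List (String × String))) (out : List (String × List (String × Int))) : Decidable (Spec_build_runtime_snapshot_from_records_py records out) := by unfold Spec_build_runtime_snapshot_from_records_py; infer_instance

-- ===== CLAIM (what is proved, stated in full; the proofs are below) =====
def Claim_equal_build_runtime_snapshot_from_records_py : Prop := ∀ (records : List (List (String × String))), Dom_build_runtime_snapshot_from_records_py records → Spec_build_runtime_snapshot_from_records_py records (build_runtime_snapshot_from_records_py records)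

-- ===== LEMMAS AND PROOFS =====

-- A's counters dict, expressed as a projection of a phase counter pc and a reason counter rc
def pvMkC (pc rc : PySem.Dict String Int) : PySem.Dict String Int :=
  PySem.Dict.mk
    [("run_count", pc.getD "started" 0), ("fail_count", pc.getD "failed" 0),
     ("timeout_count", rc.getD "timeout" 0), ("invalid_output_count", rc.getD "invalid_output" 0),
     ("budget_rejection_count", rc.getD "budget_exceeded" 0), ("fallback_count", rc.getD "specialist_execution_failed" 0),
     ("review_downgrade_count", pc.getD "review_downgraded" 0), ("reviewer_reject_count", pc.getD "reviewer_rejected" 0),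
     ("rerun_count", pc.getD "rerun_requested" 0)]

-- proof-only intermediate step: the two counters updated independently
def pvStepC (st : PySem.Dict String Int × PySem.Dict String Int) (item : List (String × String)) :
    PySem.Dict String Int × PySem.Dict String Int :=
  let pc := st.1.modify (pvPhase item) 0 (· + 1)
  let r := pvReasonStr item
  let rc := if pvRRC.contains r then st.2.modify r 0 (· + 1) else st.2
  (pc, rc)

lemma pvPhaseIfs_eq (pc rc : PySem.Dict String Int) (phase : String) :
    pvPhaseIfs (pvMkC pc rc) phase = pvMkC (pc.modify phase 0 (· + 1)) rc := by
  by_cases h1 : phase = "started"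
  · subst h1
    simp only [pvMkC, PySem.Dict.getD_modify]
    simp [pvPhaseIfs, PySem.Dict.modify, PySem.Dict.insert, PySem.Dict.getD,
      PySem.Dict.get?, PySem.Dict.contains]
  by_cases h2 : phase = "failed"
  · subst h2
    simp only [pvMkC, PySem.Dict.getD_modify]
    simp [pvPhaseIfs, PySem.Dict.modify, PySem.Dict.insert, PySem.Dict.getD,
      PySem.Dict.get?, PySem.Dict.contains]
  by_cases h3 : phase = "review_downgraded"
  · subst h3
    simp only [pvMkC, PySem.Dict.getD_modify]
    simp [pvPhaseIfs, PySem.Dict.modify, PySem.Dict.insert, PySem.Dict.getD,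
      PySem.Dict.get?, PySem.Dict.contains]
  by_cases h4 : phase = "reviewer_rejected"
  · subst h4
    simp only [pvMkC, PySem.Dict.getD_modify]
    simp [pvPhaseIfs, PySem.Dict.modify, PySem.Dict.insert, PySem.Dict.getD,
      PySem.Dict.get?, PySem.Dict.contains]
  by_cases h5 : phase = "rerun_requested"
  · subst h5
    simp only [pvMkC, PySem.Dict.getD_modify]
    simp [pvPhaseIfs, PySem.Dict.modify, PySem.Dict.insert, PySem.Dict.getD,
      PySem.Dict.get?, PySem.Dict.contains]
  · simp only [pvMkC, PySem.Dict.getD_modify]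
    simp [pvPhaseIfs, h1, h2, h3, h4, h5,
      Ne.symm h1, Ne.symm h2, Ne.symm h3, Ne.symm h4, Ne.symm h5]

lemma pvReasonIf_eq (pc rc : PySem.Dict String Int) (s : String) :
    pvReasonIf (pvMkC pc rc) (if s == "" then none else some s) =
      pvMkC pc (if pvRRC.contains s then rc.modify s 0 (· + 1) else rc) := by
  by_cases h0 : s = ""
  · subst h0
    simp only [pvReasonIf]
    rw [if_neg (by decide : ¬ pvRRC.contains "" = true)]
    rfl
  by_cases h1 : s = "timeout"
  · subst h1
    rw [if_pos (by decide : pvRRC.contains "timeout" = true)]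
    simp only [pvMkC, PySem.Dict.getD_modify]
    simp [pvReasonIf, pvRRC, PySem.Dict.ofList, PySem.Dict.update, PySem.Dict.modify,
      PySem.Dict.insert, PySem.Dict.getD, PySem.Dict.get?, PySem.Dict.contains, PySem.Dict.empty]
  by_cases h2 : s = "invalid_output"
  · subst h2
    rw [if_pos (by decide : pvRRC.contains "invalid_output" = true)]
    simp only [pvMkC, PySem.Dict.getD_modify]
    simp [pvReasonIf, pvRRC, PySem.Dict.ofList, PySem.Dict.update, PySem.Dict.modify,
      PySem.Dict.insert, PySem.Dict.getD, PySem.Dict.get?, PySem.Dict.contains, PySem.Dict.empty]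
  by_cases h3 : s = "budget_exceeded"
  · subst h3
    rw [if_pos (by decide : pvRRC.contains "budget_exceeded" = true)]
    simp only [pvMkC, PySem.Dict.getD_modify]
    simp [pvReasonIf, pvRRC, PySem.Dict.ofList, PySem.Dict.update, PySem.Dict.modify,
      PySem.Dict.insert, PySem.Dict.getD, PySem.Dict.get?, PySem.Dict.contains, PySem.Dict.empty]
  by_cases h4 : s = "specialist_execution_failed"
  · subst h4
    rw [if_pos (by decide : pvRRC.contains "specialist_execution_failed" = true)]
    simp only [pvMkC, PySem.Dict.getD_modify]
    simp [pvReasonIf, pvRRC, PySem.Dict.ofList, PySem.Dict.update, PySem.Dict.modify,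
      PySem.Dict.insert, PySem.Dict.getD, PySem.Dict.get?, PySem.Dict.contains, PySem.Dict.empty]
  · simp [pvReasonIf, pvRRC, PySem.Dict.ofList, PySem.Dict.update, PySem.Dict.insert,
      PySem.Dict.get?, PySem.Dict.contains, PySem.Dict.empty,
      h0, Ne.symm h1, Ne.symm h2, Ne.symm h3, Ne.symm h4]

lemma pvStep_eq (pc rc : PySem.Dict String Int) (item : List (String × String)) :
    pvStepA (pvMkC pc rc, pc) item =
      (pvMkC (pvStepC (pc, rc) item).1 (pvStepC (pc, rc) item).2, (pvStepC (pc, rc) item).1) := by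
  simp only [pvStepA, pvStepC, pvPhaseIfs_eq, pvReasonIf_eq]

lemma pvFold_eq (records : List (List (String × String))) (pc rc : PySem.Dict String Int) :
    records.foldl pvStepA (pvMkC pc rc, pc) =
      (pvMkC (records.foldl pvStepC (pc, rc)).1 (records.foldl pvStepC (pc, rc)).2,
       (records.foldl pvStepC (pc, rc)).1) := by
  induction records generalizing pc rc with
  | nil => rfl
  | cons item rest ih =>
      simp only [List.foldl_cons, pvStep_eq]
      exact ih _ _

-- the two components of the pvStepC fold are the counters of the staged lists
lemma pvFoldC_fst (records : List (List (String × String))) (pc rc : PySem.Dict String Int) :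
    (records.foldl pvStepC (pc, rc)).1 =
      (records.map pvPhase).foldl (fun d x => d.modify x 0 (· + 1)) pc := by
  induction records generalizing pc rc with
  | nil => rfl
  | cons item rest ih => simp only [List.foldl_cons, List.map_cons, pvStepC]; exact ih _ _

lemma pvFoldC_snd (records : List (List (String × String))) (pc rc : PySem.Dict String Int) :
    (records.foldl pvStepC (pc, rc)).2 =
      (records.filterMap (fun r =>
        let rcs := pvReasonStr r
        if pvRRC.contains rcs then some rcs else none)).foldl (fun d x => d.modify x 0 (· + 1)) rc := by
  induction records generalizing pc rc with
  | nil => rfl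
  | cons item rest ih =>
      simp only [List.foldl_cons, List.filterMap_cons, pvStepC]
      by_cases h : pvRRC.contains (pvReasonStr item) = true
      · simp only [h, if_pos, List.foldl_cons]; exact ih _ _
      · simp only [h, Bool.false_eq_true, if_false]; exact ih _ _

-- ===== VERDICT (by name: the statement is the Claim_ definition above) =====
theorem build_runtime_snapshot_from_records_py_spec : Claim_equal_build_runtime_snapshot_from_records_py := by
  intro records _
  unfold Spec_build_runtime_snapshot_from_records_py
  unfold build_runtime_snapshot_from_records_py build_runtime_snapshot_from_records_py_alt
  have h0 : (PySem.Dict.ofList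
      [("run_count", (0:Int)), ("fail_count", 0), ("timeout_count", 0), ("invalid_output_count", 0),
       ("budget_rejection_count", 0), ("fallback_count", 0), ("review_downgrade_count", 0),
       ("reviewer_reject_count", 0), ("rerun_count", 0)] )
      = pvMkC PySem.Dict.empty PySem.Dict.empty := by decide
  simp only [h0, pvFold_eq records PySem.Dict.empty PySem.Dict.empty,
    pvFoldC_fst, pvFoldC_snd]
  rw [show ∀ (l : List String), l.foldl (fun d x => d.modify x 0 (· + 1)) PySem.Dict.empty = PySem.Dict.counter l from fun l => (PySem.Dict.counter_eq_foldl l).symm]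
  rw [show ∀ (l : List String), l.foldl (fun d x => d.modify x 0 (· + 1)) PySem.Dict.empty = PySem.Dict.counter l from fun l => (PySem.Dict.counter_eq_foldl l).symm]
  simp only [pvMkC, PySem.Dict.getD_counter, PySem.Dict.items_counter, PySem.List.dedup_eq_ofList]
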